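-- pv_equiv track=rewrite | github.com/Tevronis/SSU.5course | cryptanalysis/substitution analysis/isotone_mapping.py | make_mas_sub
-- ===== SOURCE A (Python) =====
-- from copy import copy
--
-- def make_mas_sub(block, alf_ot, alf_crypt):
--     result = []
--
--     def rec(table, answer, deep, l):
--         if len(answer) == l:
--             result.append(copy(answer))
--             return
--
--         for item in table[deep][1]:
--             if item not in answer:
--                 answer.append(item)
--                 rec(table, answer, deep + 1, l)
--                 answer.pop()
--     k = 0
--     mas = []
--     values = []
--     for item in block:
--         for i in range(item):
--             for j in range(item):
--                 values.append(alf_crypt[k+j])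
--             mas.append((alf_ot[k+i], values))
--             values = []
--         k += item
--     rec(mas, [], 0, k)
--
--     return result
-- ===== SOURCE B (Python) =====
-- from itertools import product
--
-- def _all_distinct(combo):
--     seen = []
--     for v in combo:
--         if v in seen:
--             return False
--         seen.append(v)
--     return True
--
-- def make_mas_sub(block, alf_ot, alf_crypt):
--     cand_lists = []
--     k = 0
--     for item in block:
--         group = [alf_crypt[k + j] for j in range(item)]
--         cand_lists += [group] * item
--         k += item
--     result = []
--     for combo in product(*cand_lists):
--         if _all_distinct(combo):
--             result.append(list(combo))
--     return result
-- ===== Notes on version B (the rewrite author's own statement) =====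
-- stated objective: simpler
-- what changed: Replaces the recursive backtracking DFS (with in-place append/pop pruning) by a flat itertools.product over the per-position candidate lists followed by an order-preserving all-distinct filter, and drops the never-used plaintext keys from the table.
-- outside the precondition, e.g. on make_mas_sub([-1, 1], ['a', 'b'], ['x', 'y']): A returns [[]], B returns [['y']]
import Mathlib
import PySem

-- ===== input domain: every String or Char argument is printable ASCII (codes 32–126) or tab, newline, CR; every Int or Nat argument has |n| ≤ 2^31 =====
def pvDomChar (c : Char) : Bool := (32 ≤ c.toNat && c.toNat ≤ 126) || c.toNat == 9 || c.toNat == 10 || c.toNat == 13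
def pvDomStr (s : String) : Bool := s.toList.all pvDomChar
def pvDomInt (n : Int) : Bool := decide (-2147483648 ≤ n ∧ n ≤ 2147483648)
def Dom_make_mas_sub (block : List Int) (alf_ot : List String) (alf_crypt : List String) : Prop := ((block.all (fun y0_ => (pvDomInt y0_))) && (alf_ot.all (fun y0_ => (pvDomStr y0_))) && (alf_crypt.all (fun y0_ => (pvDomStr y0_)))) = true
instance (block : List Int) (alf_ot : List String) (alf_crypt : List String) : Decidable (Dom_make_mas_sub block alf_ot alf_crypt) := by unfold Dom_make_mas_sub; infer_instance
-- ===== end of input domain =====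

-- B replaces A's recursive backtracking DFS by a flat cartesian product of the candidate
-- lists followed by an order-preserving all-distinct filter (objective: simpler).


-- ===== PORT A =====
-- A's inner recursion `rec`; fuel only makes the same computation total (depth never
-- exceeds table.length + 1 on admitted inputs); `.getD` stands for the indexing that
-- raises outside Pre_.
def recA (fuel : Nat) (table : List (String × List String)) (answer : List String) (deep : Int) (l : Int) : List (List String) :=
  match fuel with
  | 0 => []
  | Nat.succ fuel =>
    if ((answer.length : Int) = l) then [answer]
    else
      (((PySem.List.pyGet? table deep).getD ("", [])).2).foldl
        (fun acc item =>
          if answer.contains item then acc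
          else acc ++ recA fuel table (answer ++ [item]) (deep + 1) l) []

-- body of A's `for item in block` preprocessing loop (state: k, mas, values)
def stepA (alf_ot alf_crypt : List String) (st : Int × List (String × List String) × List String) (item : Int) :
    Int × List (String × List String) × List String :=
  let mv := (PySem.List.pyRange 0 item 1).foldl
    (fun (mv : List (String × List String) × List String) i =>
      (mv.1 ++ [((PySem.List.pyGet? alf_ot (st.1 + i)).getD "",
                 (PySem.List.pyRange 0 item 1).foldl
                   (fun vs j => vs ++ [(PySem.List.pyGet? alf_crypt (st.1 + j)).getD ""]) mv.2)],
       ([] : List String)))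
    (st.2.1, st.2.2)
  (st.1 + item, mv.1, mv.2)

def make_mas_sub (block : List Int) (alf_ot : List String) (alf_crypt : List String) : List (List String) :=
  let st := block.foldl (stepA alf_ot alf_crypt) (0, [], [])
  recA (st.2.1.length + 2) st.2.1 [] 0 st.1

-- ===== PORT B =====
-- _all_distinct of Source B
def allDistinctGo : List String → List String → Bool
  | [], _ => true
  | v :: rest, seen => if seen.contains v then false else allDistinctGo rest (seen ++ [v])

def allDistinct (combo : List String) : Bool := allDistinctGo combo []

-- itertools.product over the candidate lists (lexicographic order)
def prodAll : List (List String) → List (List String)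
  | [] => [[]]
  | cs :: rest => cs.flatMap (fun v => (prodAll rest).map (fun t => v :: t))

-- body of Source B's `for item in block` loop (state: k, cand_lists)
def stepB (alf_crypt : List String) (st : Int × List (List String)) (item : Int) : Int × List (List String) :=
  let group := (PySem.List.pyRange 0 item 1).map (fun j => (PySem.List.pyGet? alf_crypt (st.1 + j)).getD "")
  (st.1 + item, st.2 ++ PySem.List.pyRepeat [group] item)

def make_mas_sub_alt (block : List Int) (alf_ot : List String) (alf_crypt : List String) : List (List String) :=
  let st := block.foldl (stepB alf_crypt) (0, [])
  (prodAll st.2).foldl (fun result combo => if allDistinct combo then result ++ [combo] else result) []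

-- ===== PRECONDITION & SPEC =====
-- Pre_ excludes inputs where A raises IndexError (alphabets shorter than sum(block)) and
-- inputs with negative block entries, on which A's value arises from accidental
-- negative-index wraparound and leftover negative k.
def Pre_make_mas_sub (block : List Int) (alf_ot : List String) (alf_crypt : List String) : Prop :=
  (∀ x ∈ block, 0 ≤ x) ∧ block.sum ≤ (alf_ot.length : Int) ∧ block.sum ≤ (alf_crypt.length : Int)
instance (block : List Int) (alf_ot : List String) (alf_crypt : List String) : Decidable (Pre_make_mas_sub block alf_ot alf_crypt) := by unfold Pre_make_mas_sub; infer_instance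

def pvWitness_make_mas_sub : List Int × List String × List String := ([2], ["a", "b"], ["x", "y"])

def Spec_make_mas_sub (block : List Int) (alf_ot : List String) (alf_crypt : List String) (out : List (List String)) : Prop := out = make_mas_sub_alt block alf_ot alf_crypt
instance (block : List Int) (alf_ot : List String) (alf_crypt : List String) (out : List (List String)) : Decidable (Spec_make_mas_sub block alf_ot alf_crypt out) := by unfold Spec_make_mas_sub; infer_instance

-- ===== CLAIM (what is proved, stated in full; the proofs are below) =====
def Claim_equal_make_mas_sub : Prop := ∀ (block : List Int) (alf_ot : List String) (alf_crypt : List String), Dom_make_mas_sub block alf_ot alf_crypt → Pre_make_mas_sub block alf_ot alf_crypt → Spec_make_mas_sub block alf_ot alf_crypt (make_mas_sub block alf_ot alf_crypt)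

-- ===== LEMMAS AND PROOFS =====

-- A's inner `for i in range(item)` loop appends one (key, group) pair per i and resets values.
theorem innerA_eq (kf gf : Int → String) (rng : List Int) :
    ∀ (l : List Int) (mas : List (String × List String)),
      l.foldl
        (fun (mv : List (String × List String) × List String) i =>
          (mv.1 ++ [(kf i, rng.foldl (fun vs j => vs ++ [gf j]) mv.2)], ([] : List String)))
        (mas, ([] : List String))
      = (mas ++ l.map (fun i => (kf i, rng.map gf)), ([] : List String)) := by
  intro l
  induction l with
  | nil => intro mas; simp
  | cons a l ih =>
    intro mas
    rw [List.foldl_cons, PySem.List.foldl_append_singleton_eq_map,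
      show (((mas, ([] : List String)).1 ++ [(kf a, (mas, ([] : List String)).2 ++ rng.map gf)],
             ([] : List String)))
        = (mas ++ [(kf a, rng.map gf)], ([] : List String)) from by simp,
      ih]
    simp

-- mapping snd over constant-second pairs
theorem map_snd_const {α β γ : Type} (l : List α) (kf : α → β) (g : γ) :
    (l.map (fun i => (kf i, g))).map Prod.snd = List.replicate l.length g := by
  induction l with
  | nil => simp
  | cons a l ih => simp [ih, List.replicate_succ]

-- preprocessing equivalence: A's (k, mas, values) fold vs B's (k, cand_lists) fold
theorem pre_eq (alf_ot alf_crypt : List String) :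
    ∀ (block : List Int) (k0 : Int) (mas0 : List (String × List String)),
      (∀ x ∈ block, 0 ≤ x) →
      (block.foldl (stepA alf_ot alf_crypt) (k0, mas0, ([] : List String))).2.2 = [] ∧
      (block.foldl (stepA alf_ot alf_crypt) (k0, mas0, ([] : List String))).1 = k0 + block.sum ∧
      ((block.foldl (stepA alf_ot alf_crypt) (k0, mas0, ([] : List String))).2.1.length : Int)
        = (mas0.length : Int) + block.sum ∧
      block.foldl (stepB alf_crypt) (k0, mas0.map Prod.snd)
        = ((block.foldl (stepA alf_ot alf_crypt) (k0, mas0, ([] : List String))).1,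
           (block.foldl (stepA alf_ot alf_crypt) (k0, mas0, ([] : List String))).2.1.map Prod.snd) := by
  intro block
  induction block with
  | nil => intro k0 mas0 _; simp
  | cons item rest ih =>
    intro k0 mas0 hpos
    have hitem : 0 ≤ item := hpos item (by simp)
    have hrest : ∀ x ∈ rest, 0 ≤ x := fun x hx => hpos x (by simp [hx])
    have hA : stepA alf_ot alf_crypt (k0, mas0, ([] : List String)) item
        = (k0 + item,
           mas0 ++ (PySem.List.pyRange 0 item 1).map
             (fun i => ((PySem.List.pyGet? alf_ot (k0 + i)).getD "",
                        (PySem.List.pyRange 0 item 1).map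
                          (fun j => (PySem.List.pyGet? alf_crypt (k0 + j)).getD ""))),
           ([] : List String)) := by
      unfold stepA
      rw [innerA_eq]
    have hB : stepB alf_crypt (k0, mas0.map Prod.snd) item
        = (k0 + item,
           (mas0 ++ (PySem.List.pyRange 0 item 1).map
             (fun i => ((PySem.List.pyGet? alf_ot (k0 + i)).getD "",
                        (PySem.List.pyRange 0 item 1).map
                          (fun j => (PySem.List.pyGet? alf_crypt (k0 + j)).getD "")))).map Prod.snd) := by
      simp [stepB, PySem.List.pyRepeat_singleton]
      rw [← List.map_map, map_snd_const, PySem.List.length_pyRange_one]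
      norm_num
    obtain ⟨h1, h2, h3, h4⟩ := ih (k0 + item)
      (mas0 ++ (PySem.List.pyRange 0 item 1).map
        (fun i => ((PySem.List.pyGet? alf_ot (k0 + i)).getD "",
                   (PySem.List.pyRange 0 item 1).map
                     (fun j => (PySem.List.pyGet? alf_crypt (k0 + j)).getD "")))) hrest
    refine ⟨?_, ?_, ?_, ?_⟩
    · simpa [hA] using h1
    · simp only [List.foldl_cons, hA, List.sum_cons]
      rw [h2]; ring
    · simp only [List.foldl_cons, hA, List.sum_cons]
      rw [h3]
      simp [PySem.List.length_pyRange_one]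
      omega
    · simp only [List.foldl_cons, hA, hB]
      exact h4

-- the DFS with pruning equals the product filtered by the running-distinctness check
theorem recA_eq (table : List (String × List String)) :
    ∀ (fuel : Nat) (answer : List String),
      answer.length ≤ table.length →
      table.length - answer.length < fuel →
      recA fuel table answer (answer.length : Int) (table.length : Int)
        = ((prodAll ((table.map Prod.snd).drop answer.length)).filter
             (fun c => allDistinctGo c answer)).map (fun c => answer ++ c) := by
  intro fuel
  induction fuel with
  | zero => intro answer _ h; omega
  | succ fuel ih =>
    intro answer hle hfuel
    by_cases hlen : answer.length = table.length
    · have hdrop : (table.map Prod.snd).drop table.length = [] :=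
        List.drop_eq_nil_of_le (by simp)
      simp [recA, hlen, hdrop, prodAll, allDistinctGo]
    · have hlt : answer.length < table.length := Nat.lt_of_le_of_ne hle hlen
      have hne : ¬ ((answer.length : Int) = (table.length : Int)) := by
        exact_mod_cast hlen
      have hget : PySem.List.pyGet? table (answer.length : Int) = some table[answer.length] := by
        rw [PySem.List.pyGet?_natCast]
        exact List.getElem?_eq_getElem hlt
      have hdrop : (table.map Prod.snd).drop answer.length
          = table[answer.length].2 :: (table.map Prod.snd).drop (answer.length + 1) := by
        rw [List.drop_eq_getElem_cons (by simpa using hlt)]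
        simp
      rw [hdrop]
      simp only [recA, hne, if_false, hget, Option.getD_some, prodAll]
      rw [show (fun (acc : List (List String)) (item : String) =>
            if answer.contains item then acc
            else acc ++ recA fuel table (answer ++ [item]) ((answer.length : Int) + 1) (table.length : Int))
          = (fun acc item => acc ++ (if answer.contains item then []
            else recA fuel table (answer ++ [item]) ((answer.length : Int) + 1) (table.length : Int))) from by
          funext acc item
          by_cases h : item ∈ answer <;> simp [h]]
      rw [PySem.List.foldl_append_eq_flatMap, List.nil_append,
        List.filter_flatMap, List.map_flatMap]
      congr 1
      funext v
      by_cases hv : v ∈ answer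
      · have hfalse : ∀ c : List String, allDistinctGo (v :: c) answer = false := by
          intro c; simp [allDistinctGo, hv]
        simp [hv, List.filter_map, Function.comp_def, hfalse]
      · have hrec := ih (answer ++ [v]) (by simp; omega) (by simp; omega)
        have hcast : ((answer ++ [v]).length : Int) = (answer.length : Int) + 1 := by simp
        have hlen2 : (answer ++ [v]).length = answer.length + 1 := by simp
        rw [hcast, hlen2] at hrec
        rw [if_neg (show ¬ (answer.contains v = true) from by simpa using hv), hrec,
          List.filter_map, List.map_map]
        have hp : (fun x => allDistinctGo (v :: x) answer)
            = (fun x => allDistinctGo x (answer ++ [v])) := by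
          funext x; simp [allDistinctGo, hv]
        simp only [Function.comp_def]
        rw [hp]
        simp

-- B's final accumulation loop is a filter
theorem bloop_eq (l : List (List String)) :
    l.foldl (fun result combo => if allDistinct combo then result ++ [combo] else result) []
      = l.filter (fun c => allDistinctGo c []) := by
  have := PySem.List.foldl_append_if_eq_filter (fun c => allDistinct c) l ([] : List (List String))
  simpa [allDistinct] using this

-- ===== VERDICT (by name: the statement is the Claim_ definition above) =====
theorem make_mas_sub_spec : Claim_equal_make_mas_sub := by
  intro block alf_ot alf_crypt _ hp
  unfold Spec_make_mas_sub make_mas_sub make_mas_sub_alt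
  obtain ⟨h1, h2, h3, h4⟩ := pre_eq alf_ot alf_crypt block 0 [] hp.1
  simp only [List.map_nil] at h4
  dsimp only
  rw [h4]
  dsimp only
  have hk : (block.foldl (stepA alf_ot alf_crypt) (0, [], [])).1
      = ((block.foldl (stepA alf_ot alf_crypt) (0, [], [])).2.1.length : Int) := by
    rw [h2, h3]; simp
  have hrec := recA_eq (block.foldl (stepA alf_ot alf_crypt) (0, [], [])).2.1
    ((block.foldl (stepA alf_ot alf_crypt) (0, [], [])).2.1.length + 2) [] (by simp) (by omega)
  simp only [List.length_nil, Nat.cast_zero, List.drop_zero, List.nil_append] at hrec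
  rw [hk, hrec, bloop_eq]
  simp
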